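-- pv_equiv track=rewrite | github.com/areebahmeddd/udaan.ai | app/agents/college_agent.py | map_courses
-- ===== SOURCE A (Python) =====
-- from typing import Dict, Any, List
--
-- def map_courses(courses: List[str]) -> List[str]:
--     course_mapping = {
--         "B.Tech": ["engineering"],
--         "B.Tech CSE": ["engineering"],
--         "MBBS": ["medical"],
--         "B.Pharmacy": ["pharmacy"],
--         "B.Sc Nursing": ["medical"],
--         "B.Com": ["management"],
--         "BBA": ["management"],
--         "CA Foundation": ["management"],
--         "Banking & Insurance": ["management"],
--         "BA": ["law"],
--         "B.Ed": ["law"],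
--         "Law": ["law"],
--         "B.Arch": ["architecture"],
--         "BA Fine Arts": ["architecture"],
--         "Design": ["architecture"],
--         "Mass Communication": ["law"],
--         "Journalism": ["law"],
--         "Diploma": ["engineering"],
--         "ITI": ["engineering"],
--         "Paramedical": ["medical"],
--         "Hospitality": ["management"],
--         "Hotel Management": ["management"],
--     }
--
--     mapped_fields = []
--     for course in courses:
--         course_found = False
--         for key in course_mapping:
--             if key.lower() in course.lower():
--                 mapped_fields.extend(course_mapping[key])
--                 course_found = True
--                 break
--
--         if not course_found:
--             if any(
--                 word in course.lower()
--                 for word in [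
--                     "tech",
--                     "engineer",
--                     "computer",
--                     "mechanical",
--                     "civil",
--                     "electrical",
--                 ]
--             ):
--                 mapped_fields.append("engineering")
--             elif any(
--                 word in course.lower()
--                 for word in ["medical", "mbbs", "doctor", "nurse", "pharmacy", "dental"]
--             ):
--                 mapped_fields.append("medical")
--             elif any(
--                 word in course.lower()
--                 for word in [
--                     "commerce",
--                     "management",
--                     "business",
--                     "finance",
--                     "economics",
--                 ]
--             ):
--                 mapped_fields.append("management")
--             elif any(
--                 word in course.lower()
--                 for word in ["architecture", "design", "fine arts"]
--             ):
--                 mapped_fields.append("architecture")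
--             elif any(
--                 word in course.lower()
--                 for word in ["law", "legal", "arts", "humanities", "social"]
--             ):
--                 mapped_fields.append("law")
--
--     return (
--         list(set(mapped_fields))
--         if mapped_fields
--         else ["engineering", "medical", "management"]
--     )
-- ===== SOURCE B (Python) =====
-- # Loop inversion: instead of scanning the rule list per course with an early break,
-- # sweep the rules once (rule-major) over a parallel per-course Option state; each rule
-- # claims every still-unassigned course containing its substring, then the assigned
-- # fields are read off in course order.
--
-- _RULES = [
--     # dict keys (lowercased), in dict order
--     ("b.tech", "engineering"), ("b.tech cse", "engineering"), ("mbbs", "medical"),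
--     ("b.pharmacy", "pharmacy"), ("b.sc nursing", "medical"), ("b.com", "management"),
--     ("bba", "management"), ("ca foundation", "management"),
--     ("banking & insurance", "management"), ("ba", "law"), ("b.ed", "law"),
--     ("law", "law"), ("b.arch", "architecture"), ("ba fine arts", "architecture"),
--     ("design", "architecture"), ("mass communication", "law"), ("journalism", "law"),
--     ("diploma", "engineering"), ("iti", "engineering"), ("paramedical", "medical"),
--     ("hospitality", "management"), ("hotel management", "management"),
--     # fallback keywords, in elif-chain order
--     ("tech", "engineering"), ("engineer", "engineering"), ("computer", "engineering"),
--     ("mechanical", "engineering"), ("civil", "engineering"), ("electrical", "engineering"),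
--     ("medical", "medical"), ("mbbs", "medical"), ("doctor", "medical"),
--     ("nurse", "medical"), ("pharmacy", "medical"), ("dental", "medical"),
--     ("commerce", "management"), ("management", "management"), ("business", "management"),
--     ("finance", "management"), ("economics", "management"),
--     ("architecture", "architecture"), ("design", "architecture"), ("fine arts", "architecture"),
--     ("law", "law"), ("legal", "law"), ("arts", "law"),
--     ("humanities", "law"), ("social", "law"),
-- ]
--
--
-- def map_courses(courses):
--     state = [[c.lower(), None] for c in courses]
--     for sub, field in _RULES:
--         for entry in state:
--             if entry[1] is None and sub in entry[0]:
--                 entry[1] = field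
--     fields = [f for _, f in state if f is not None]
--     return list(set(fields)) if fields else ["engineering", "medical", "management"]
-- ===== Notes on version B (the rewrite author's own statement) =====
-- stated objective: alternative
-- what changed: Inverts the loop nesting: instead of scanning the dict keys and the five elif keyword groups per course with an early break, B sweeps a flat prebuilt priority-ordered rule list once (rule-major) over a parallel per-course Option state where each rule claims every still-unassigned matching course, then reads the fields off in course order; agreement rests on each course keeping the field of its first matching rule.
import Mathlib
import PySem

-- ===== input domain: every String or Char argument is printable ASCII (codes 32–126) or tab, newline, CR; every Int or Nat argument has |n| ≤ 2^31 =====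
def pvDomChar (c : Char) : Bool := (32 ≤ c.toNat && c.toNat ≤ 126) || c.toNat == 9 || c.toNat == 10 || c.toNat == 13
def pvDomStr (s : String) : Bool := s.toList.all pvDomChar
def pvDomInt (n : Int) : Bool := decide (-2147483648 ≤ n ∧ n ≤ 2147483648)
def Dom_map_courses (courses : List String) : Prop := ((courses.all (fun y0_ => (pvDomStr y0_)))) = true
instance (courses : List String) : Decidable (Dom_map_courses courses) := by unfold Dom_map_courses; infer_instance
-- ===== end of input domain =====

-- B inverts the loop nesting: a rule-major sweep of one flat priority-ordered rule list over a
-- parallel per-course Option state replaces A's per-course scan of dict keys plus elif chain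
-- (objective: alternative; same return value).

-- ===== PORT A =====
def pvCourseMapping : PySem.Dict String (List String) :=
  PySem.Dict.ofList [
    ("B.Tech", ["engineering"]), ("B.Tech CSE", ["engineering"]), ("MBBS", ["medical"]),
    ("B.Pharmacy", ["pharmacy"]), ("B.Sc Nursing", ["medical"]), ("B.Com", ["management"]),
    ("BBA", ["management"]), ("CA Foundation", ["management"]),
    ("Banking & Insurance", ["management"]), ("BA", ["law"]), ("B.Ed", ["law"]),
    ("Law", ["law"]), ("B.Arch", ["architecture"]), ("BA Fine Arts", ["architecture"]),
    ("Design", ["architecture"]), ("Mass Communication", ["law"]), ("Journalism", ["law"]),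
    ("Diploma", ["engineering"]), ("ITI", ["engineering"]), ("Paramedical", ["medical"]),
    ("Hospitality", ["management"]), ("Hotel Management", ["management"])]

-- the elif chain run when no dict key matched ([] = no branch fired, nothing appended)
def pvFallbackA (course : String) : List String :=
  if ["tech", "engineer", "computer", "mechanical", "civil", "electrical"].any
      (fun w => PySem.Str.isIn w (PySem.Str.lower course)) then ["engineering"]
  else if ["medical", "mbbs", "doctor", "nurse", "pharmacy", "dental"].any
      (fun w => PySem.Str.isIn w (PySem.Str.lower course)) then ["medical"]
  else if ["commerce", "management", "business", "finance", "economics"].any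
      (fun w => PySem.Str.isIn w (PySem.Str.lower course)) then ["management"]
  else if ["architecture", "design", "fine arts"].any
      (fun w => PySem.Str.isIn w (PySem.Str.lower course)) then ["architecture"]
  else if ["law", "legal", "arts", "humanities", "social"].any
      (fun w => PySem.Str.isIn w (PySem.Str.lower course)) then ["law"]
  else []

-- the inner 'for key in course_mapping: … break' is a first-match search over the keys
def pvCourseA (course : String) : List String :=
  match pvCourseMapping.keys.find?
      (fun k => PySem.Str.isIn (PySem.Str.lower k) (PySem.Str.lower course)) with
  | some k => pvCourseMapping.getD k []
  | none => pvFallbackA course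

def map_courses (courses : List String) : List String :=
  let mapped := courses.foldl (fun acc course => acc ++ pvCourseA course) []
  if mapped.isEmpty then ["engineering", "medical", "management"] else PySem.Set.ofList mapped

-- ===== PORT B =====
def pvRules : List (String × String) := [
    ("b.tech", "engineering"), ("b.tech cse", "engineering"), ("mbbs", "medical"),
    ("b.pharmacy", "pharmacy"), ("b.sc nursing", "medical"), ("b.com", "management"),
    ("bba", "management"), ("ca foundation", "management"),
    ("banking & insurance", "management"), ("ba", "law"), ("b.ed", "law"),
    ("law", "law"), ("b.arch", "architecture"), ("ba fine arts", "architecture"),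
    ("design", "architecture"), ("mass communication", "law"), ("journalism", "law"),
    ("diploma", "engineering"), ("iti", "engineering"), ("paramedical", "medical"),
    ("hospitality", "management"), ("hotel management", "management"),
    ("tech", "engineering"), ("engineer", "engineering"), ("computer", "engineering"),
    ("mechanical", "engineering"), ("civil", "engineering"), ("electrical", "engineering"),
    ("medical", "medical"), ("mbbs", "medical"), ("doctor", "medical"),
    ("nurse", "medical"), ("pharmacy", "medical"), ("dental", "medical"),
    ("commerce", "management"), ("management", "management"), ("business", "management"),
    ("finance", "management"), ("economics", "management"),
    ("architecture", "architecture"), ("design", "architecture"), ("fine arts", "architecture"),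
    ("law", "law"), ("legal", "law"), ("arts", "law"),
    ("humanities", "law"), ("social", "law")]

-- one rule updates one [lowered_course, field] entry ('if entry[1] is None and sub in entry[0]')
def pvUpd (e : String × Option String) (r : String × String) : String × Option String :=
  if e.2.isNone && PySem.Str.isIn r.1 e.1 then (e.1, some r.2) else e

-- one rule sweeps the whole state ('for entry in state: …')
def pvStep (st : List (String × Option String)) (r : String × String) : List (String × Option String) :=
  st.map (fun e => pvUpd e r)

def map_courses_alt (courses : List String) : List String :=
  let state0 := courses.map (fun c => (PySem.Str.lower c, (none : Option String)))
  let state := pvRules.foldl pvStep state0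
  let fields := state.filterMap (fun e => e.2)
  if fields.isEmpty then ["engineering", "medical", "management"] else PySem.Set.ofList fields

-- ===== PRECONDITION & SPEC =====
def Spec_map_courses (courses : List String) (out : List String) : Prop := out = map_courses_alt courses
instance (courses : List String) (out : List String) : Decidable (Spec_map_courses courses out) := by unfold Spec_map_courses; infer_instance

-- ===== CLAIM (what is proved, stated in full; the proofs are below) =====
def Claim_equal_map_courses : Prop := ∀ (courses : List String), Dom_map_courses courses → Spec_map_courses courses (map_courses courses)

-- ===== LEMMAS AND PROOFS =====

-- the field B's rules carry for a dict key k (its singleton mapping's element)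
def pvG (k : String) : String := (pvCourseMapping.getD k []).headD ""

theorem pv_find?_cons_if {α : Type} (p : α → Bool) (a : α) (l : List α) :
    (a :: l).find? p = if p a then some a else l.find? p := by
  by_cases h : p a <;> simp [List.find?_cons_of_pos, List.find?_cons_of_neg, h]

-- scanning the mapped key rows = searching the keys themselves
theorem pv_find_map_keys (keys : List String) (s : String) :
    ((keys.map (fun k => (PySem.Str.lower k, pvG k))).find?
        (fun p => PySem.Str.isIn p.1 s))
      = (keys.find? (fun k => PySem.Str.isIn (PySem.Str.lower k) s)).map
          (fun k => (PySem.Str.lower k, pvG k)) := by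
  induction keys with
  | nil => rfl
  | cons k t ih =>
    cases h : PySem.Str.isIn (PySem.Str.lower k) s <;>
      simp only [List.map_cons, pv_find?_cons_if, h, Bool.false_eq_true, if_true, if_false,
        Option.map_some, ih]

-- every dict value is the singleton of its pvG field
theorem pv_getD_singleton : ∀ k ∈ pvCourseMapping.keys, pvCourseMapping.getD k [] = [pvG k] := by
  decide

-- A's per-course list read off an optional matched rule row
def pvF (o : Option (String × String)) : List String :=
  ((o.map Prod.snd).map (fun f => [f])).getD []

-- one keyword group of the fallback rules: first-match scan = 'any' test on the group
theorem pv_scan_group (ws : List String) (v : String) (rest : List (String × String)) (s : String) :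
    pvF ((ws.map (fun w => (w, v)) ++ rest).find? (fun p => PySem.Str.isIn p.1 s))
      = if ws.any (fun w => PySem.Str.isIn w s) then [v]
        else pvF (rest.find? (fun p => PySem.Str.isIn p.1 s)) := by
  induction ws with
  | nil => simp
  | cons w t ih =>
    cases h : PySem.Str.isIn w s with
    | false =>
      simp only [List.map_cons, List.cons_append, pv_find?_cons_if, List.any_cons, h,
        Bool.false_eq_true, if_false, Bool.false_or, ih]
    | true =>
      simp only [List.map_cons, List.cons_append, pv_find?_cons_if, List.any_cons, h,
        Bool.true_or, if_true]
      rfl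

-- the fallback rows of pvRules are the five keyword groups of A's elif chain
theorem pvFallback_groups :
    pvRules.drop 22
      = (["tech", "engineer", "computer", "mechanical", "civil", "electrical"].map (fun w => (w, "engineering")))
        ++ ((["medical", "mbbs", "doctor", "nurse", "pharmacy", "dental"].map (fun w => (w, "medical")))
        ++ ((["commerce", "management", "business", "finance", "economics"].map (fun w => (w, "management")))
        ++ ((["architecture", "design", "fine arts"].map (fun w => (w, "architecture")))
        ++ ((["law", "legal", "arts", "humanities", "social"].map (fun w => (w, "law")))
        ++ ([] : List (String × String)))))) := by
  rfl

theorem pvRules_split : pvRules =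
    pvCourseMapping.keys.map (fun k => (PySem.Str.lower k, pvG k)) ++ pvRules.drop 22 := by
  decide

-- the elif chain equals a first-match scan of the fallback rows
theorem pv_fallback_eq (course : String) :
    pvFallbackA course
      = pvF ((pvRules.drop 22).find? (fun p => PySem.Str.isIn p.1 (PySem.Str.lower course))) := by
  rw [pvFallback_groups, pv_scan_group, pv_scan_group, pv_scan_group, pv_scan_group, pv_scan_group]
  rfl

-- the first matching rule for a lowered course (first-match semantics shared by both sides)
def pvFirst (c : String) : Option String :=
  (pvRules.find? (fun p => PySem.Str.isIn p.1 c)).map Prod.snd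

-- A's per-course contribution is exactly the optional first-matching rule's field
theorem pv_course_eq (course : String) :
    pvCourseA course = ((pvFirst (PySem.Str.lower course)).map (fun f => [f])).getD [] := by
  unfold pvCourseA pvFirst
  rw [pvRules_split, List.find?_append, pv_find_map_keys]
  cases hf : pvCourseMapping.keys.find?
      (fun k => PySem.Str.isIn (PySem.Str.lower k) (PySem.Str.lower course)) with
  | some k =>
    have hk : k ∈ pvCourseMapping.keys := List.mem_of_find?_eq_some hf
    show pvCourseMapping.getD k [] = _
    rw [pv_getD_singleton k hk]
    rfl
  | none =>
    show pvFallbackA course = _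
    rw [pv_fallback_eq course]
    rfl

-- an already-assigned entry is never touched by further rules
theorem pv_fold_some (rs : List (String × String)) (c f) :
    rs.foldl pvUpd (c, some f) = (c, some f) := by
  induction rs with
  | nil => rfl
  | cons r t ih => simpa [pvUpd] using ih

-- an unassigned entry ends up with the field of its first matching rule
theorem pv_fold_none (rs : List (String × String)) (c : String) :
    rs.foldl pvUpd (c, none)
      = (c, (rs.find? (fun p => PySem.Str.isIn p.1 c)).map Prod.snd) := by
  induction rs with
  | nil => rfl
  | cons r t ih =>
    cases h : PySem.Chars.isIn r.1.toList c.toList with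
    | false => simp [pvUpd, PySem.Str.isIn, h, ih]
    | true => simp [pvUpd, PySem.Str.isIn, h, pv_fold_some]

-- the rule-major sweep acts on every entry independently
theorem pv_sweep_map (rs : List (String × String)) (st : List (String × Option String)) :
    rs.foldl pvStep st = st.map (fun e => rs.foldl pvUpd e) := by
  induction rs generalizing st with
  | nil => simp
  | cons r t ih => simp [pvStep, ih, Function.comp_def]

-- A's accumulation is the filterMap of the shared per-course first match
theorem pv_A_filterMap (courses : List String) :
    courses.foldl (fun acc course => acc ++ pvCourseA course) []
      = courses.filterMap (fun c => pvFirst (PySem.Str.lower c)) := by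
  rw [PySem.List.foldl_append_eq_flatMap]
  simp only [List.nil_append]
  induction courses with
  | nil => rfl
  | cons c t ih =>
    simp only [List.flatMap_cons, List.filterMap_cons, pv_course_eq, ih]
    cases pvFirst (PySem.Str.lower c) <;> simp

-- ===== VERDICT (by name: the statement is the Claim_ definition above) =====
theorem map_courses_spec : Claim_equal_map_courses := by
  intro courses _
  unfold Spec_map_courses map_courses map_courses_alt
  have hA := pv_A_filterMap courses
  have hB : ((pvRules.foldl pvStep (courses.map (fun c => (PySem.Str.lower c, (none : Option String))))).filterMap (fun e => e.2))
      = courses.filterMap (fun c => pvFirst (PySem.Str.lower c)) := by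
    rw [pv_sweep_map, List.map_map, List.filterMap_map]
    simp [Function.comp_def, pv_fold_none, pvFirst]
  simp only [hA, hB]
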